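-- pv_equiv track=rewrite | github.com/Forec/cloud-storage-webserver | app/main/views.py | generatePathList
-- ===== SOURCE A (Python) =====
-- def generatePathList(p):
--     ans = []
--     parts = p.split('/')[:-1]
--     sum = ''
--     for i in range(0, len(parts)):
--         parts[i] = parts[i] + '/'
--         sum += parts[i]
--         ans.append((sum, parts[i]))
--     return ans
-- ===== SOURCE B (Python) =====
-- def generatePathList(p):
--     def go(parts):
--         if not parts:
--             return []
--         head = parts[0] + '/'
--         return [(head, head)] + [(head + s, t) for (s, t) in go(parts[1:])]
--     return go(p.split('/')[:-1])
-- ===== Notes on version B (the rewrite author's own statement) =====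
-- stated objective: alternative
-- what changed: Replaces the index loop with a mutated parts list and a manually threaded running-prefix accumulator by structural recursion on the split parts: each level emits its own piece and prepends it to every prefix of the recursive result.
import Mathlib
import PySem

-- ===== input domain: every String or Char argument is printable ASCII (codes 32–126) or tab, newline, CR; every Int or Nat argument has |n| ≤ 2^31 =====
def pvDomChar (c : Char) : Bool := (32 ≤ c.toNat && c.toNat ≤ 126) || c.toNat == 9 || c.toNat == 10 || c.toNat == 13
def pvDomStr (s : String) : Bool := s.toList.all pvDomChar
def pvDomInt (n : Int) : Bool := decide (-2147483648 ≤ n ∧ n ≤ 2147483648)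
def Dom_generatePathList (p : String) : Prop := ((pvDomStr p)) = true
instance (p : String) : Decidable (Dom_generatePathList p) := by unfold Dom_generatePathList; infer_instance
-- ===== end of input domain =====

-- B replaces A's index loop (mutating parts, threading a running-prefix accumulator) by
-- structural recursion on the split parts, prepending each head piece to the recursive prefixes.

-- ===== PORT A =====
def generatePathList (p : String) : List (String × String) :=
  -- parts = p.split('/')[:-1]
  let parts := PySem.List.slice ((PySem.Str.split? p "/").getD []) none (some (-1))
  -- for i in range(0, len(parts)): piece = parts[i]+'/' ; sum += piece ; ans.append((sum, piece))
  ((PySem.List.pyRange 0 (parts.length : Int) 1).foldl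
    (fun (st : List (String × String) × String) i =>
      let piece := PySem.List.pyGetD parts i "" ++ "/"
      let sum := st.2 ++ piece
      (st.1 ++ [(sum, piece)], sum)) ([], "")).1

-- ===== PORT B =====
def pvGo (parts : List String) : List (String × String) :=
  match parts with
  | [] => []
  | x :: xs =>
    let head := x ++ "/"
    [(head, head)] ++ (pvGo xs).map (fun st => (head ++ st.1, st.2))

def generatePathList_alt (p : String) : List (String × String) :=
  pvGo (PySem.List.slice ((PySem.Str.split? p "/").getD []) none (some (-1)))

-- ===== PRECONDITION & SPEC =====
def Spec_generatePathList (p : String) (out : List (String × String)) : Prop := out = generatePathList_alt p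
instance (p : String) (out : List (String × String)) : Decidable (Spec_generatePathList p out) := by unfold Spec_generatePathList; infer_instance

-- ===== CLAIM (what is proved, stated in full; the proofs are below) =====
def Claim_equal_generatePathList : Prop := ∀ (p : String), Dom_generatePathList p → Spec_generatePathList p (generatePathList p)

-- ===== LEMMAS AND PROOFS =====

-- A's loop with accumulator (ans, s) appends, after prefixing s, exactly pvGo of the remaining parts.
theorem pvLoop_eq_go (parts : List String) (ans : List (String × String)) (s : String) :
    (parts.foldl
      (fun (st : List (String × String) × String) (x : String) =>
        let piece := x ++ "/"
        let sum := st.2 ++ piece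
        (st.1 ++ [(sum, piece)], sum)) (ans, s)).1
    = ans ++ (pvGo parts).map (fun st => (s ++ st.1, st.2)) := by
  induction parts generalizing ans s with
  | nil => simp [pvGo]
  | cons x xs ih =>
    simp only [List.foldl_cons, pvGo, ih]
    simp [List.map_map, Function.comp, List.append_assoc, String.append_assoc]

-- A's index loop over range(len(parts)) reads parts[i] only: it is the element fold.
theorem pvRange_fold_eq (parts : List String) :
    (PySem.List.pyRange 0 (parts.length : Int) 1).foldl
      (fun (st : List (String × String) × String) i =>
        let piece := PySem.List.pyGetD parts i "" ++ "/"
        let sum := st.2 ++ piece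
        (st.1 ++ [(sum, piece)], sum)) ([], "")
    = parts.foldl
      (fun (st : List (String × String) × String) (x : String) =>
        let piece := x ++ "/"
        let sum := st.2 ++ piece
        (st.1 ++ [(sum, piece)], sum)) ([], "") :=
  PySem.List.foldl_pyRange_zero_pyGetD' parts ""
    (fun (st : List (String × String) × String) (x : String) =>
      let piece := x ++ "/"
      let sum := st.2 ++ piece
      (st.1 ++ [(sum, piece)], sum)) ([], "")

theorem pvBoth_eq (parts : List String) :
    ((PySem.List.pyRange 0 (parts.length : Int) 1).foldl
      (fun (st : List (String × String) × String) i =>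
        let piece := PySem.List.pyGetD parts i "" ++ "/"
        let sum := st.2 ++ piece
        (st.1 ++ [(sum, piece)], sum)) ([], "")).1 = pvGo parts := by
  rw [pvRange_fold_eq, pvLoop_eq_go]
  simp

theorem generatePathList_eq (p : String) : generatePathList p = generatePathList_alt p :=
  pvBoth_eq _

-- ===== VERDICT (by name: the statement is the Claim_ definition above) =====
theorem generatePathList_spec : Claim_equal_generatePathList := by
  intro p _
  exact generatePathList_eq p
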